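-- pv_equiv track=rewrite | github.com/ZaneWarner/Algorithms-II | Clustering/MaxSpaceClustering.py | kruskalClustering
-- ===== SOURCE A (Python) =====
-- class disjointSet():
--     def __init__(self, node):
--         self.node = node
--         self.parent = self
--         self.size = 1
--
--     def find(self):
--         if self.parent.parent == self.parent:
--             return self.parent
--         else:
--             leader = self.parent.find()
--             self.parent = leader
--             return leader
--
--     def union(self, otherSet):
--         otherLeader = otherSet.find()
--         leader = self.find()
--         if leader.size >= otherLeader.size:
--             otherLeader.parent = leader
--             leader.size += otherLeader.size
--         else:
--             leader.parent = otherLeader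
--             otherLeader.size += leader.size
--
-- def kruskalClustering(edges, numNodes,numClusters):
--     edges.sort()
--     nodes = []
--     for node in range(numNodes):
--         nodes.append(disjointSet(node))
--     clusters = numNodes
--     for edge in edges:
--         node1 = nodes[edge[1]]
--         node2 = nodes[edge[2]]
--         if node1.find() != node2.find():
--             if clusters <= numClusters:
--                 spacing = edge[0]
--                 return spacing
--             node1.union(node2)
--             clusters -= 1
-- ===== SOURCE B (Python) =====
-- def kruskalClustering(edges, numNodes, numClusters):
--     # Quick-find: flat label array instead of a parent-pointer forest.
--     edges.sort()
--     label = list(range(numNodes))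
--     clusters = numNodes
--     for w, u, v in edges:
--         lu = label[u]
--         lv = label[v]
--         if lu != lv:
--             if clusters <= numClusters:
--                 return w
--             label = [lu if x == lv else x for x in label]
--             clusters -= 1
-- ===== Notes on version B (the rewrite author's own statement) =====
-- stated objective: simpler
-- what changed: Replaces the disjointSet class (parent-pointer forest with union-by-size and recursive path-compressing find) by a flat quick-find label list: connectivity is one list lookup and a merge is a single relabelling comprehension, with no recursion, no sizes and no object graph.
-- outside the precondition, e.g. on kruskalClustering([(1, 0, 1), (5, 9, 9)], 2, 2): A returns 1, B returns 1
import Mathlib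
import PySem

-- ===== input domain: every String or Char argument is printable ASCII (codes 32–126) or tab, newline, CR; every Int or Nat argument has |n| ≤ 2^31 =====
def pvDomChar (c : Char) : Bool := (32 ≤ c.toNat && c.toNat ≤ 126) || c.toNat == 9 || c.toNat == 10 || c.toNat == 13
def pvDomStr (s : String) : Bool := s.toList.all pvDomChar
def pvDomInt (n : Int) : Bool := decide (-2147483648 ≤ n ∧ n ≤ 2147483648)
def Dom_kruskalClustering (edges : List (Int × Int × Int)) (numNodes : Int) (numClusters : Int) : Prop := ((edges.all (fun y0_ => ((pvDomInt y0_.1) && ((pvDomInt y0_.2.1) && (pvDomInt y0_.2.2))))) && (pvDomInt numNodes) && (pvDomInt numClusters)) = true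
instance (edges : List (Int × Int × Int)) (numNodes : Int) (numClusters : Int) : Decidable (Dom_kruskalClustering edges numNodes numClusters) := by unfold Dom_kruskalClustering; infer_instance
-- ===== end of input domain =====

-- B replaces A's union-find forest (parent pointers, sizes, path compression) by a flat
-- quick-find label array merged by a single relabelling scan: simpler, no recursion.
-- Both A and B sort `edges` in place (same observable mutation); equivalence is about the return value.

-- ===== PORT A =====
-- A disjointSet object is modelled by its node index (a Nat); the 'parent' pointers live in
-- the list `par`, the 'size' fields in the list `size`.  `nodes[edge[k]]` is Python list
-- indexing (negative wrap), exact under Pre_; out-of-range accesses (excluded by Pre_) fall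
-- back to getD defaults.  `pvFindA` is disjointSet.find with its path compression; the fuel
-- `par.length + 1` is never exhausted under Pre_ (proved below via a depth invariant).
def pvNormA (x : Int) (numNodes : Int) : Nat := (if x < 0 then x + numNodes else x).toNat

def pvFindA : Nat → List Nat → Nat → Nat × List Nat
  | 0, par, i => (i, par)
  | fuel + 1, par, i =>
    let p := par.getD i 0
    if par.getD p 0 = p then (p, par)
    else
      let res := pvFindA fuel par p
      (res.1, res.2.set i res.1)

def pvLoopA : List (Int × Int × Int) → List Nat → List Int → Int → Int → Int → Option Int
  | [], _, _, _, _, _ => none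
  | e :: rest, par, size, clusters, numNodes, numClusters =>
    let i := pvNormA e.2.1 numNodes
    let j := pvNormA e.2.2 numNodes
    let f1 := pvFindA (par.length + 1) par i          -- node1.find()
    let f2 := pvFindA (f1.2.length + 1) f1.2 j        -- node2.find()
    if f1.1 ≠ f2.1 then
      if clusters ≤ numClusters then some e.1
      else
        let fo := pvFindA (f2.2.length + 1) f2.2 j    -- otherLeader = otherSet.find()
        let fl := pvFindA (fo.2.length + 1) fo.2 i    -- leader = self.find()
        if size.getD fo.1 0 ≤ size.getD fl.1 0 then   -- leader.size >= otherLeader.size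
          pvLoopA rest (fl.2.set fo.1 fl.1) (size.set fl.1 (size.getD fl.1 0 + size.getD fo.1 0)) (clusters - 1) numNodes numClusters
        else
          pvLoopA rest (fl.2.set fl.1 fo.1) (size.set fo.1 (size.getD fo.1 0 + size.getD fl.1 0)) (clusters - 1) numNodes numClusters
    else pvLoopA rest f2.2 size clusters numNodes numClusters

def kruskalClustering (edges : List (Int × Int × Int)) (numNodes : Int) (numClusters : Int) : Option Int :=
  let es := PySem.List.sorted edges (fun e => toLex (e.1, toLex (e.2.1, e.2.2))) false
  pvLoopA es (List.range numNodes.toNat) (List.replicate numNodes.toNat (1 : Int)) numNodes numNodes numClusters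

-- ===== PORT B =====
def pvLoopB : List (Int × Int × Int) → List Int → Int → Int → Option Int
  | [], _, _, _ => none
  | e :: rest, label, clusters, numClusters =>
    let lu := PySem.List.pyGetD label e.2.1 0
    let lv := PySem.List.pyGetD label e.2.2 0
    if lu ≠ lv then
      if clusters ≤ numClusters then some e.1
      else pvLoopB rest (label.map fun x => if x = lv then lu else x) (clusters - 1) numClusters
    else pvLoopB rest label clusters numClusters

def kruskalClustering_alt (edges : List (Int × Int × Int)) (numNodes : Int) (numClusters : Int) : Option Int :=
  let es := PySem.List.sorted edges (fun e => toLex (e.1, toLex (e.2.1, e.2.2))) false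
  pvLoopB es (PySem.List.pyRange 0 numNodes 1) numNodes numClusters

-- ===== PRECONDITION & SPEC =====
-- Pre_ excludes the inputs on which A can raise IndexError: an edge endpoint outside
-- Python's index range [-numNodes, numNodes) of the nodes list.  This is slightly narrower
-- than A's domain: if the answer is returned before an out-of-range edge is reached, A (and
-- B, which indexes the same way) still returns; exactly characterising that would require
-- replaying the loop, so all out-of-range endpoints are excluded instead.
def Pre_kruskalClustering (edges : List (Int × Int × Int)) (numNodes : Int) (numClusters : Int) : Prop :=
  ∀ e ∈ edges, PySem.Raise.InRange numNodes.toNat e.2.1 ∧ PySem.Raise.InRange numNodes.toNat e.2.2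
instance (edges : List (Int × Int × Int)) (numNodes : Int) (numClusters : Int) : Decidable (Pre_kruskalClustering edges numNodes numClusters) := by unfold Pre_kruskalClustering; infer_instance

def pvWitness_kruskalClustering : (List (Int × Int × Int)) × Int × Int := ([(1, 0, 1), (5, 1, 2)], 3, 2)

def Spec_kruskalClustering (edges : List (Int × Int × Int)) (numNodes : Int) (numClusters : Int) (out : Option Int) : Prop := out = kruskalClustering_alt edges numNodes numClusters
instance (edges : List (Int × Int × Int)) (numNodes : Int) (numClusters : Int) (out : Option Int) : Decidable (Spec_kruskalClustering edges numNodes numClusters out) := by unfold Spec_kruskalClustering; infer_instance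

-- ===== CLAIM (what is proved, stated in full; the proofs are below) =====
def Claim_equal_kruskalClustering : Prop := ∀ (edges : List (Int × Int × Int)) (numNodes : Int) (numClusters : Int), Dom_kruskalClustering edges numNodes numClusters → Pre_kruskalClustering edges numNodes numClusters → Spec_kruskalClustering edges numNodes numClusters (kruskalClustering edges numNodes numClusters)

-- ===== LEMMAS AND PROOFS =====

-- `pvRootsTo par i r`: following parent pointers from i reaches the root r (par.getD r 0 = r).
inductive pvRootsTo (par : List Nat) : Nat → Nat → Prop
  | root (i : Nat) : par.getD i 0 = i → pvRootsTo par i i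
  | step (i r : Nat) : pvRootsTo par (par.getD i 0) r → pvRootsTo par i r

theorem pvRootsTo_fix {par : List Nat} {i r : Nat} (h : pvRootsTo par i r) : par.getD r 0 = r := by
  induction h with
  | root i h => exact h
  | step i r _ ih => exact ih

theorem pvRootsTo_fix_eq {par : List Nat} {r s : Nat} (hfix : par.getD r 0 = r)
    (h : pvRootsTo par r s) : s = r := by
  have H : ∀ i t, pvRootsTo par i t → par.getD i 0 = i → t = i := by
    intro i t h
    induction h with
    | root i h => intro _; rfl
    | step i r h ih => intro hfix; rw [hfix] at ih; exact ih hfix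
  exact H r s h hfix

theorem pvRootsTo_unique {par : List Nat} {i r s : Nat}
    (h1 : pvRootsTo par i r) (h2 : pvRootsTo par i s) : r = s := by
  have H : ∀ a b, pvRootsTo par a b → ∀ c, pvRootsTo par a c → b = c := by
    intro a b hab
    induction hab with
    | root i hfix => intro c h2; exact (pvRootsTo_fix_eq hfix h2).symm
    | step i r hp ih =>
      intro c h2
      cases h2
      case root hfx2 =>
        rw [hfx2] at hp
        exact pvRootsTo_fix_eq hfx2 hp
      case step hp2 => exact ih c hp2
  exact H i r h1 s h2

theorem pvRootsTo_lt {n : Nat} {par : List Nat} {i r : Nat}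
    (hent : ∀ k, k < n → par.getD k 0 < n) (hi : i < n) (h : pvRootsTo par i r) : r < n := by
  have H : ∀ i r, pvRootsTo par i r → i < n → r < n := by
    intro i r h
    induction h with
    | root i h => intro hi; exact hi
    | step i r h ih => intro hi; exact ih (hent i hi)
  exact H i r h hi

-- Invariant relating A's forest state to B's label array, with a ghost depth function.
structure pvInvD (n : Nat) (par : List Nat) (label : List Int) (dep : Nat → Nat) : Prop where
  plen : par.length = n
  llen : label.length = n
  ent : ∀ k, k < n → par.getD k 0 < n
  fix0 : ∀ k, k < n → (par.getD k 0 = k ↔ dep k = 0)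
  dec : ∀ k, k < n → par.getD k 0 ≠ k → dep (par.getD k 0) < dep k
  bound : ∀ k, k < n → dep k < label.countP (fun x => x == label.getD k 0)
  sep : ∀ i j ri rj, i < n → j < n → pvRootsTo par i ri → pvRootsTo par j rj →
        (label.getD i 0 = label.getD j 0 ↔ ri = rj)

def pvInv (n : Nat) (par : List Nat) (label : List Int) : Prop := ∃ dep, pvInvD n par label dep

theorem pvRootsTo_total {n : Nat} {par : List Nat} {dep : Nat → Nat}
    (hent : ∀ k, k < n → par.getD k 0 < n)
    (hdec : ∀ k, k < n → par.getD k 0 ≠ k → dep (par.getD k 0) < dep k) :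
    ∀ m i, i < n → dep i ≤ m → ∃ r, pvRootsTo par i r := by
  intro m
  induction m with
  | zero =>
    intro i hi hd
    refine ⟨i, .root i ?_⟩
    by_contra h
    exact absurd (hdec i hi h) (by omega)
  | succ m ih =>
    intro i hi hd
    by_cases h : par.getD i 0 = i
    · exact ⟨i, .root i h⟩
    · obtain ⟨r, hr⟩ := ih (par.getD i 0) (hent i hi) (by have := hdec i hi h; omega)
      exact ⟨r, .step i r hr⟩

theorem pvGetD_set_self {α : Type} [Inhabited α] (l : List α) (i : Nat) (v d : α) (h : i < l.length) :
    (l.set i v).getD i d = v := by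
  simp [List.getD, h]

theorem pvGetD_set_ne {α : Type} [Inhabited α] (l : List α) (i k : Nat) (v d : α) (h : k ≠ i) :
    (l.set i v).getD k d = l.getD k d := by
  simp [List.getD, List.getElem?_set_ne (Ne.symm h)]

theorem pvGetD_map_lt (l : List Int) (f : Int → Int) (k : Nat) (h : k < l.length) :
    (l.map f).getD k 0 = f (l.getD k 0) := by
  rw [List.getD_eq_getElem _ _ (by simpa using h), List.getD_eq_getElem _ _ h]
  simp

-- Compression step: repointing i to its own root changes no root.
theorem pvRootsTo_set_root {par : List Nat} {i r : Nat} (hi : i < par.length)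
    (hroot : pvRootsTo par i r) :
    ∀ k s, pvRootsTo (par.set i r) k s ↔ pvRootsTo par k s := by
  have hfix : par.getD r 0 = r := pvRootsTo_fix hroot
  have hsetfix : (par.set i r).getD r 0 = r := by
    by_cases hri : r = i
    · rw [hri, pvGetD_set_self _ _ _ _ hi]
    · rw [pvGetD_set_ne _ _ _ _ _ hri]; exact hfix
  intro k s
  constructor
  · intro h
    induction h with
    | root k hk =>
      by_cases hki : k = i
      · subst hki
        rw [pvGetD_set_self _ _ _ _ hi] at hk
        exact hk ▸ hroot
      · rw [pvGetD_set_ne _ _ _ _ _ hki] at hk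
        exact .root k hk
    | step k s hp ih =>
      by_cases hki : k = i
      · subst hki
        rw [pvGetD_set_self _ _ _ _ hi] at ih
        have hs : s = r := pvRootsTo_fix_eq hfix ih
        exact hs ▸ hroot
      · rw [pvGetD_set_ne _ _ _ _ _ hki] at ih
        exact .step k s ih
  · intro h
    induction h with
    | root k hk =>
      by_cases hki : k = i
      · subst hki
        have hre : r = k := pvRootsTo_fix_eq hk hroot
        exact .root k (by rw [pvGetD_set_self _ _ _ _ hi]; exact hre)
      · exact .root k (by rw [pvGetD_set_ne _ _ _ _ _ hki]; exact hk)
    | step k s hp ih =>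
      by_cases hki : k = i
      · subst hki
        have hs : s = r := pvRootsTo_unique (pvRootsTo.step k s hp) hroot
        subst hs
        exact .step k s (by rw [pvGetD_set_self _ _ _ _ hi]; exact .root s hsetfix)
      · exact .step k s (by rw [pvGetD_set_ne _ _ _ _ _ hki]; exact ih)

-- Union step: repointing the root r2 to the root r1 merges exactly those two classes.
theorem pvRootsTo_set_union {par : List Nat} {r1 r2 : Nat}
    (h1 : par.getD r1 0 = r1) (h2 : par.getD r2 0 = r2) (hne : r1 ≠ r2) (hlen : r2 < par.length) :
    ∀ k s, pvRootsTo (par.set r2 r1) k s ↔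
      ((pvRootsTo par k s ∧ s ≠ r2) ∨ (pvRootsTo par k r2 ∧ s = r1)) := by
  have hq2 : (par.set r2 r1).getD r2 0 = r1 := pvGetD_set_self _ _ _ _ hlen
  have hq1 : (par.set r2 r1).getD r1 0 = r1 := by
    rw [pvGetD_set_ne _ _ _ _ _ hne]; exact h1
  have hB1 : ∀ k s, pvRootsTo par k s → s ≠ r2 → pvRootsTo (par.set r2 r1) k s := by
    intro k s h
    induction h with
    | root k hk =>
      intro hs
      exact .root k (by rw [pvGetD_set_ne _ _ _ _ _ hs]; exact hk)
    | step k s hp ih =>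
      intro hs
      by_cases hk2 : k = r2
      · rw [hk2, h2] at hp
        exact absurd (pvRootsTo_fix_eq h2 hp) hs
      · exact .step k s (by rw [pvGetD_set_ne _ _ _ _ _ hk2]; exact ih hs)
  have hB2 : ∀ k s, pvRootsTo par k s → s = r2 → pvRootsTo (par.set r2 r1) k r1 := by
    intro k s h
    induction h with
    | root k hk =>
      intro he; subst he
      exact .step k r1 (by rw [hq2]; exact .root r1 hq1)
    | step k s hp ih =>
      intro he
      by_cases hk2 : k = r2
      · subst hk2
        exact .step k r1 (by rw [hq2]; exact .root r1 hq1)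
      · exact .step k r1 (by rw [pvGetD_set_ne _ _ _ _ _ hk2]; exact ih he)
  intro k s
  constructor
  · intro h
    induction h with
    | root k hk =>
      by_cases hk2 : k = r2
      · subst hk2; rw [hq2] at hk; exact absurd hk hne
      · rw [pvGetD_set_ne _ _ _ _ _ hk2] at hk
        exact Or.inl ⟨.root k hk, hk2⟩
    | step k s hp ih =>
      by_cases hk2 : k = r2
      · subst hk2
        rw [hq2] at ih
        rcases ih with ⟨ha, _⟩ | ⟨hb, hs⟩
        · exact Or.inr ⟨.root k h2, pvRootsTo_fix_eq h1 ha⟩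
        · exact absurd (pvRootsTo_fix_eq h1 hb) (Ne.symm hne)
      · rw [pvGetD_set_ne _ _ _ _ _ hk2] at ih
        rcases ih with ⟨ha, hs⟩ | ⟨hb, hs⟩
        · exact Or.inl ⟨.step k s ha, hs⟩
        · exact Or.inr ⟨.step k r2 hb, hs⟩
  · rintro (⟨h, hs⟩ | ⟨h, hs⟩)
    · exact hB1 k s h hs
    · subst hs
      exact hB2 k r2 h rfl

theorem pvFindA_spec {n : Nat} {label : List Int} {dep : Nat → Nat} :
    ∀ (fuel : Nat) (par : List Nat) (i : Nat), pvInvD n par label dep → i < n → dep i < fuel →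
      pvRootsTo par i (pvFindA fuel par i).1 ∧
      pvInvD n (pvFindA fuel par i).2 label dep ∧
      (∀ k s, pvRootsTo (pvFindA fuel par i).2 k s ↔ pvRootsTo par k s) := by
  intro fuel
  induction fuel with
  | zero => intro par i inv hi hd; omega
  | succ fuel ih =>
    intro par i inv hi hd
    simp only [pvFindA]
    set p := par.getD i 0 with hp
    have hpn : p < n := inv.ent i hi
    by_cases hfp : par.getD p 0 = p
    · rw [if_pos hfp]
      exact ⟨.step i p (by rw [← hp]; exact .root p hfp), inv, fun k s => Iff.rfl⟩
    · rw [if_neg hfp]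
      have hii : par.getD i 0 ≠ i := by
        intro he
        exact hfp (by rw [hp.trans he]; exact he)
      have hdp : dep p < dep i := by
        have := inv.dec i hi hii
        rwa [← hp] at this
      obtain ⟨hr, hinv2, hiff⟩ := ih par p inv hpn (by omega)
      set res := pvFindA fuel par p with hres
      have hfixr : par.getD res.1 0 = res.1 := pvRootsTo_fix hr
      have hrn : res.1 < n := pvRootsTo_lt inv.ent hpn hr
      have hri : pvRootsTo par i res.1 := .step i res.1 (by rw [← hp]; exact hr)
      have hri2 : pvRootsTo res.2 i res.1 := (hiff i res.1).mpr hri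
      have hlen2 : res.2.length = n := hinv2.plen
      have hi2 : i < res.2.length := by omega
      have hsr := pvRootsTo_set_root hi2 hri2
      have hrnei : res.1 ≠ i := by
        intro he
        rw [he] at hfixr
        exact hii hfixr
      have hdi0 : dep i ≠ 0 := fun h0 => hii ((inv.fix0 i hi).mpr h0)
      have hdr0 : dep res.1 = 0 := (inv.fix0 res.1 hrn).mp hfixr
      refine ⟨hri, ?_, fun k s => (hsr k s).trans (hiff k s)⟩
      refine ⟨by simp [List.length_set, hlen2], hinv2.llen, ?_, ?_, ?_, hinv2.bound, ?_⟩
      · intro k hk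
        by_cases hki : k = i
        · rw [hki, pvGetD_set_self _ _ _ _ hi2]; exact hrn
        · rw [pvGetD_set_ne _ _ _ _ _ hki]; exact hinv2.ent k hk
      · intro k hk
        by_cases hki : k = i
        · rw [hki, pvGetD_set_self _ _ _ _ hi2]
          constructor
          · intro he; exact absurd he hrnei
          · intro h0; exact absurd h0 hdi0
        · rw [pvGetD_set_ne _ _ _ _ _ hki]; exact hinv2.fix0 k hk
      · intro k hk hne
        by_cases hki : k = i
        · rw [hki, pvGetD_set_self _ _ _ _ hi2]
          omega
        · rw [pvGetD_set_ne _ _ _ _ _ hki] at hne ⊢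
          exact hinv2.dec k hk hne
      · intro a b ra rb ha hb hra hrb
        exact hinv2.sep a b ra rb ha hb ((hsr a ra).mp hra) ((hsr b rb).mp hrb)

theorem pvCountP_or (l : List Int) (lu lv : Int) (hne : lu ≠ lv) :
    l.countP (fun x => (if x = lv then lu else x) == lu) =
      l.countP (fun x => x == lu) + l.countP (fun x => x == lv) := by
  induction l with
  | nil => rfl
  | cons a t ih =>
    simp only [List.countP_cons, ih]
    by_cases h : a = lv
    · subst h; simp [beq_iff_eq, Ne.symm hne]; omega
    · by_cases h2 : a = lu
      · subst h2; simp [beq_iff_eq, h]; omega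
      · simp [beq_iff_eq, h, h2]

theorem pvCountP_other (l : List Int) (lu lv c : Int) (hu : c ≠ lu) (hv : c ≠ lv) :
    l.countP (fun x => (if x = lv then lu else x) == c) = l.countP (fun x => x == c) := by
  induction l with
  | nil => rfl
  | cons a t ih =>
    simp only [List.countP_cons, ih]
    by_cases h : a = lv <;> simp [h, Ne.symm hv, Ne.symm hu]

theorem pvSepArith {La Lb Lc Lp lu lv : Int} {ra rb Ra Rb rc rp : Nat}
    (hab : La = Lb ↔ Ra = Rb) (hac : La = Lc ↔ Ra = rc) (hap : La = Lp ↔ Ra = rp)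
    (hbc : Lb = Lc ↔ Rb = rc) (hbp : Lb = Lp ↔ Rb = rp)
    (hpa : (La = lu ∨ La = lv) ↔ (La = Lc ∨ La = Lp))
    (hpb : (Lb = lu ∨ Lb = lv) ↔ (Lb = Lc ∨ Lb = Lp))
    (hcha : (ra = Ra ∧ ra ≠ rc) ∨ (Ra = rc ∧ ra = rp))
    (hchb : (rb = Rb ∧ rb ≠ rc) ∨ (Rb = rc ∧ rb = rp)) :
    (La = Lb ∨ ((La = lu ∨ La = lv) ∧ (Lb = lu ∨ Lb = lv))) ↔ ra = rb := by
  have hApair : (La = lu ∨ La = lv) → (Ra = rc ∨ Ra = rp) := by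
    intro h
    rcases hpa.mp h with h | h
    · exact Or.inl (hac.mp h)
    · exact Or.inr (hap.mp h)
  have hBpair : (Lb = lu ∨ Lb = lv) → (Rb = rc ∨ Rb = rp) := by
    intro h
    rcases hpb.mp h with h | h
    · exact Or.inl (hbc.mp h)
    · exact Or.inr (hbp.mp h)
  rcases hcha with ⟨ha1, ha2⟩ | ⟨ha1, ha2⟩ <;> rcases hchb with ⟨hb1, hb2⟩ | ⟨hb1, hb2⟩
  · constructor
    · rintro (h | ⟨h1, h2⟩)
      · exact ha1.trans ((hab.mp h).trans hb1.symm)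
      · have hA : Ra = rp := by
          rcases hApair h1 with h | h
          · exact absurd (ha1.trans h) ha2
          · exact h
        have hB : Rb = rp := by
          rcases hBpair h2 with h | h
          · exact absurd (hb1.trans h) hb2
          · exact h
        exact ha1.trans (hA.trans (hB.symm.trans hb1.symm))
    · intro h
      exact Or.inl (hab.mpr (ha1.symm.trans (h.trans hb1)))
  · constructor
    · rintro (h | ⟨h1, h2⟩)
      · exact absurd (ha1.trans ((hab.mp h).trans hb1)) ha2
      · have hA : Ra = rp := by
          rcases hApair h1 with h | h
          · exact absurd (ha1.trans h) ha2
          · exact h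
        exact ha1.trans (hA.trans hb2.symm)
    · intro h
      have hA : Ra = rp := ha1.symm.trans (h.trans hb2)
      exact Or.inr ⟨hpa.mpr (Or.inr (hap.mpr hA)), hpb.mpr (Or.inl (hbc.mpr hb1))⟩
  · constructor
    · rintro (h | ⟨h1, h2⟩)
      · exact absurd (hb1.trans ((hab.mp h).symm.trans ha1)) hb2
      · have hB : Rb = rp := by
          rcases hBpair h2 with h | h
          · exact absurd (hb1.trans h) hb2
          · exact h
        exact ha2.trans (hB.symm.trans hb1.symm)
    · intro h
      have hB : Rb = rp := hb1.symm.trans (h.symm.trans ha2)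
      exact Or.inr ⟨hpa.mpr (Or.inl (hac.mpr ha1)), hpb.mpr (Or.inr (hbp.mpr hB))⟩
  · constructor
    · intro _
      exact ha2.trans hb2.symm
    · intro _
      exact Or.inl ((hac.mpr ha1).trans (hbc.mpr hb1).symm)

-- Invariant preservation for the union step (either attachment direction).
set_option maxHeartbeats 1000000 in
theorem pvInv_union {n : Nat} {par : List Nat} {label : List Int} {dep : Nat → Nat}
    (inv : pvInvD n par label dep) {r1 r2 : Nat} (hr1 : r1 < n) (hr2 : r2 < n)
    (hfix1 : par.getD r1 0 = r1) (hfix2 : par.getD r2 0 = r2) (hne : r1 ≠ r2)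
    {lu lv : Int} (hlu : label.getD r1 0 = lu) (hlv : label.getD r2 0 = lv)
    {rc rp : Nat} (hcp : (rc = r1 ∧ rp = r2) ∨ (rc = r2 ∧ rp = r1)) :
    pvInv n (par.set rc rp) (label.map fun x => if x = lv then lu else x) := by
  have hluv : lu ≠ lv := by
    intro he
    exact hne ((inv.sep r1 r2 r1 r2 hr1 hr2 (.root r1 hfix1) (.root r2 hfix2)).mp
      (by rw [hlu, hlv, he]))
  have hfixc : par.getD rc 0 = rc := by rcases hcp with ⟨h, _⟩ | ⟨h, _⟩ <;> rw [h] <;> assumption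
  have hfixp : par.getD rp 0 = rp := by rcases hcp with ⟨_, h⟩ | ⟨_, h⟩ <;> rw [h] <;> assumption
  have hrcn : rc < n := by rcases hcp with ⟨h, _⟩ | ⟨h, _⟩ <;> rw [h] <;> assumption
  have hrpn : rp < n := by rcases hcp with ⟨_, h⟩ | ⟨_, h⟩ <;> rw [h] <;> assumption
  have hnecp : rc ≠ rp := by
    rcases hcp with ⟨h, h2⟩ | ⟨h, h2⟩ <;> rw [h, h2]
    · exact hne
    · exact Ne.symm hne
  have hor : (label.getD rc 0 = lu ∧ label.getD rp 0 = lv) ∨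
      (label.getD rc 0 = lv ∧ label.getD rp 0 = lu) := by
    rcases hcp with ⟨h, h2⟩ | ⟨h, h2⟩
    · exact Or.inl (by rw [h, h2]; exact ⟨hlu, hlv⟩)
    · exact Or.inr (by rw [h, h2]; exact ⟨hlv, hlu⟩)
  clear hcp hfix1 hfix2 hr1 hr2 hne hlu hlv
  have hclpl : label.getD rc 0 ≠ label.getD rp 0 := by
    rcases hor with ⟨h, h2⟩ | ⟨h, h2⟩ <;> rw [h, h2]
    · exact hluv
    · exact Ne.symm hluv
  have hpair : ∀ x : Int, (x = lu ∨ x = lv) ↔ (x = label.getD rc 0 ∨ x = label.getD rp 0) := by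
    intro x
    rcases hor with ⟨h, h2⟩ | ⟨h, h2⟩ <;> rw [h, h2] <;> tauto
  have htot : ∀ i, i < n → ∃ Ri, pvRootsTo par i Ri ∧ Ri < n := by
    intro i hi
    obtain ⟨Ri, hRi⟩ := pvRootsTo_total inv.ent inv.dec (dep i) i hi le_rfl
    exact ⟨Ri, hRi, pvRootsTo_lt inv.ent hi hRi⟩
  have hlrc : ∀ i Ri, i < n → pvRootsTo par i Ri →
      (label.getD i 0 = label.getD rc 0 ↔ Ri = rc) := by
    intro i Ri hi hRi
    exact inv.sep i rc Ri rc hi hrcn hRi (.root rc hfixc)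
  have hlrp : ∀ i Ri, i < n → pvRootsTo par i Ri →
      (label.getD i 0 = label.getD rp 0 ↔ Ri = rp) := by
    intro i Ri hi hRi
    exact inv.sep i rp Ri rp hi hrpn hRi (.root rp hfixp)
  have hlablen : label.length = n := inv.llen
  have hmemu : lu ∈ label := by
    rcases hor with ⟨h, _⟩ | ⟨_, h⟩ <;> rw [← h] <;>
      · rw [List.getD_eq_getElem _ _ (by omega)]
        exact List.getElem_mem _
  have hmemv : lv ∈ label := by
    rcases hor with ⟨_, h⟩ | ⟨h, _⟩ <;> rw [← h] <;>
      · rw [List.getD_eq_getElem _ _ (by omega)]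
        exact List.getElem_mem _
  have hcu1 : 0 < label.countP (fun x => x == lu) := List.countP_pos_iff.mpr ⟨lu, hmemu, by simp⟩
  have hcv1 : 0 < label.countP (fun x => x == lv) := List.countP_pos_iff.mpr ⟨lv, hmemv, by simp⟩
  have huni := pvRootsTo_set_union hfixp hfixc (Ne.symm hnecp) (by rw [inv.plen]; exact hrcn)
  have hmaplen : (label.map fun x => if x = lv then lu else x).length = label.length :=
    List.length_map _
  have hget' : ∀ k, k < n → (label.map fun x => if x = lv then lu else x).getD k 0 =
      (if label.getD k 0 = lv then lu else label.getD k 0) := by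
    intro k hk
    exact pvGetD_map_lt label _ k (by omega)
  have hrclen : rc < par.length := by rw [inv.plen]; exact hrcn
  refine ⟨fun k => if label.getD k 0 = label.getD rc 0 then dep k + 1 else dep k,
    by simp [List.length_set, inv.plen], by rw [hmaplen, hlablen], ?_, ?_, ?_, ?_, ?_⟩
  · -- ent
    intro k hk
    by_cases hki : k = rc
    · rw [hki, pvGetD_set_self _ _ _ _ hrclen]; exact hrpn
    · rw [pvGetD_set_ne _ _ _ _ _ hki]; exact inv.ent k hk
  · -- fix0
    intro k hk
    by_cases hki : k = rc
    · rw [hki, pvGetD_set_self _ _ _ _ hrclen, if_pos rfl]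
      constructor
      · intro he; exact absurd he (Ne.symm hnecp)
      · intro he; omega
    · rw [pvGetD_set_ne _ _ _ _ _ hki]
      by_cases hlk : label.getD k 0 = label.getD rc 0
      · rw [if_pos hlk]
        constructor
        · intro he
          exact absurd ((hlrc k k hk (.root k he)).mp hlk) hki
        · intro he; omega
      · rw [if_neg hlk]; exact inv.fix0 k hk
  · -- dec
    intro k hk hneq
    by_cases hki : k = rc
    · rw [hki, pvGetD_set_self _ _ _ _ hrclen, if_neg (Ne.symm hclpl), if_pos rfl]
      have h0 : dep rp = 0 := (inv.fix0 rp hrpn).mp hfixp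
      omega
    · rw [pvGetD_set_ne _ _ _ _ _ hki] at hneq ⊢
      have hmn : par.getD k 0 < n := inv.ent k hk
      obtain ⟨Rk, hRk, -⟩ := htot k hk
      have hRm : pvRootsTo par (par.getD k 0) Rk := by
        cases hRk
        case root hx => exact absurd hx hneq
        case step hx => exact hx
      have hlab : label.getD (par.getD k 0) 0 = label.getD k 0 :=
        (inv.sep (par.getD k 0) k Rk Rk hmn hk hRm hRk).mpr rfl
      have hd := inv.dec k hk hneq
      rw [hlab]
      by_cases hlk : label.getD k 0 = label.getD rc 0
      · rw [if_pos hlk, if_pos hlk]; omega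
      · rw [if_neg hlk, if_neg hlk]; omega
  · -- bound
    intro k hk
    rw [hget' k hk, List.countP_map]
    simp only [Function.comp_def]
    by_cases h1 : label.getD k 0 = lv
    · rw [if_pos h1, pvCountP_or label lu lv hluv]
      have hb := inv.bound k hk
      rw [h1] at hb
      by_cases h2 : label.getD k 0 = label.getD rc 0
      · rw [if_pos h2]; omega
      · rw [if_neg h2]; omega
    · rw [if_neg h1]
      by_cases h2 : label.getD k 0 = lu
      · have hb := inv.bound k hk
        rw [h2] at hb
        by_cases h3 : label.getD k 0 = label.getD rc 0
        · rw [if_pos h3, h2, pvCountP_or label lu lv hluv]; omega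
        · rw [if_neg h3, h2, pvCountP_or label lu lv hluv]; omega
      · rw [pvCountP_other label lu lv (label.getD k 0) h2 h1]
        have hlkc : label.getD k 0 ≠ label.getD rc 0 := by
          rcases hor with ⟨h, _⟩ | ⟨h, _⟩ <;> rw [h] <;> assumption
        rw [if_neg hlkc]; exact inv.bound k hk
  · -- sep
    intro a b ra rb ha hb hra hrb
    rw [hget' a ha, hget' b hb]
    obtain ⟨Ra, hRa, hRan⟩ := htot a ha
    obtain ⟨Rb, hRb, hRbn⟩ := htot b hb
    have hab : label.getD a 0 = label.getD b 0 ↔ Ra = Rb := inv.sep a b Ra Rb ha hb hRa hRb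
    have hac := hlrc a Ra ha hRa
    have hap := hlrp a Ra ha hRa
    have hbc := hlrc b Rb hb hRb
    have hbp := hlrp b Rb hb hRb
    have hpa := hpair (label.getD a 0)
    have hpb := hpair (label.getD b 0)
    have hcha : (ra = Ra ∧ ra ≠ rc) ∨ (Ra = rc ∧ ra = rp) := by
      rcases (huni a ra).mp hra with ⟨hx, hy⟩ | ⟨hx, hy⟩
      · exact Or.inl ⟨pvRootsTo_unique hx hRa, hy⟩
      · exact Or.inr ⟨(pvRootsTo_unique hx hRa).symm, hy⟩
    have hchb : (rb = Rb ∧ rb ≠ rc) ∨ (Rb = rc ∧ rb = rp) := by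
      rcases (huni b rb).mp hrb with ⟨hx, hy⟩ | ⟨hx, hy⟩
      · exact Or.inl ⟨pvRootsTo_unique hx hRb, hy⟩
      · exact Or.inr ⟨(pvRootsTo_unique hx hRb).symm, hy⟩
    have hfab : ((if label.getD a 0 = lv then lu else label.getD a 0) =
                 (if label.getD b 0 = lv then lu else label.getD b 0)) ↔
        (label.getD a 0 = label.getD b 0 ∨
          ((label.getD a 0 = lu ∨ label.getD a 0 = lv) ∧
           (label.getD b 0 = lu ∨ label.getD b 0 = lv))) := by
      by_cases h1 : label.getD a 0 = lv
      · rw [if_pos h1]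
        by_cases h2 : label.getD b 0 = lv
        · rw [if_pos h2]; omega
        · rw [if_neg h2]; omega
      · rw [if_neg h1]
        by_cases h2 : label.getD b 0 = lv
        · rw [if_pos h2]; omega
        · rw [if_neg h2]; omega
    rw [hfab]
    exact pvSepArith hab hac hap hbc hbp hpa hpb hcha hchb

theorem pvLabel_getD_norm {n : Nat} (numNodes : Int) (label : List Int) (u : Int)
    (hn : n = numNodes.toNat) (hpos : 0 < numNodes) (hlen : label.length = n)
    (hu : PySem.Raise.InRange n u) :
    PySem.List.pyGetD label u 0 = label.getD (pvNormA u numNodes) 0 ∧ pvNormA u numNodes < n := by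
  obtain ⟨hlo, hhi⟩ := hu
  have hnn : (n : Int) = numNodes := by omega
  by_cases hneg : u < 0
  · have h1 : pvNormA u numNodes = (u + numNodes).toNat := by
      unfold pvNormA
      rw [if_pos hneg]
    have h2 : pvNormA u numNodes < n := by rw [h1]; omega
    refine ⟨?_, h2⟩
    rw [h1]
    unfold PySem.List.pyGetD PySem.List.pyGet? PySem.List.pyIdx?
    rw [if_neg (by omega), if_pos (by rw [hlen]; push_cast; omega)]
    have hidx : label.length - (-u).toNat = (u + numNodes).toNat := by rw [hlen]; omega
    simp [List.getD, hidx]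
  · have h1 : pvNormA u numNodes = u.toNat := by
      unfold pvNormA
      rw [if_neg hneg]
    have h2 : pvNormA u numNodes < n := by rw [h1]; omega
    refine ⟨?_, h2⟩
    rw [h1]
    unfold PySem.List.pyGetD PySem.List.pyGet? PySem.List.pyIdx?
    rw [if_pos (by omega), if_pos (by rw [hlen]; push_cast; omega)]
    simp [List.getD]

theorem pvLoop_eq (numNodes numClusters : Int) (n : Nat) (hn : n = numNodes.toNat) :
    ∀ (es : List (Int × Int × Int)) (par : List Nat) (label : List Int) (size : List Int)
      (clusters : Int),
      (∀ e ∈ es, PySem.Raise.InRange n e.2.1 ∧ PySem.Raise.InRange n e.2.2) →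
      pvInv n par label →
      pvLoopA es par size clusters numNodes numClusters = pvLoopB es label clusters numClusters := by
  intro es
  induction es with
  | nil => intro par label size clusters hpre hinv; rfl
  | cons e rest ih =>
    intro par label size clusters hpre hinv
    obtain ⟨dep, inv⟩ := hinv
    have hue := hpre e (List.mem_cons_self)
    obtain ⟨hu, hv⟩ := hue
    obtain ⟨hu1, hu2⟩ := hu
    obtain ⟨hv1, hv2⟩ := hv
    have hprer : ∀ x ∈ rest, PySem.Raise.InRange n x.2.1 ∧ PySem.Raise.InRange n x.2.2 :=
      fun x hx => hpre x (List.mem_cons_of_mem _ hx)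
    have hn0 : 0 < n := by omega
    have hposN : 0 < numNodes := by omega
    have hfuel : ∀ (L : List Nat) k, pvInvD n L label dep → k < n → dep k < L.length + 1 := by
      intro L k invL hk
      have hb := invL.bound k hk
      have hc : label.countP (fun x => x == label.getD k 0) ≤ label.length :=
        List.countP_le_length
      have := invL.llen
      have := invL.plen
      omega
    obtain ⟨hgu, hiu⟩ := pvLabel_getD_norm numNodes label e.2.1 hn hposN inv.llen ⟨hu1, hu2⟩
    obtain ⟨hgv, hiv⟩ := pvLabel_getD_norm numNodes label e.2.2 hn hposN inv.llen ⟨hv1, hv2⟩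
    simp only [pvLoopA, pvLoopB]
    rw [hgu, hgv]
    set i := pvNormA e.2.1 numNodes with hidef
    set j := pvNormA e.2.2 numNodes with hjdef
    obtain ⟨hr1, hinv1, hiff1⟩ :=
      pvFindA_spec (par.length + 1) par i inv hiu (hfuel par i inv hiu)
    set f1 := pvFindA (par.length + 1) par i with hf1def
    obtain ⟨hr2, hinv2, hiff2⟩ :=
      pvFindA_spec (f1.2.length + 1) f1.2 j hinv1 hiv (hfuel f1.2 j hinv1 hiv)
    set f2 := pvFindA (f1.2.length + 1) f1.2 j with hf2def
    have hr2p : pvRootsTo par j f2.1 := (hiff1 j f2.1).mp hr2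
    have hsep : label.getD i 0 = label.getD j 0 ↔ f1.1 = f2.1 :=
      inv.sep i j f1.1 f2.1 hiu hiv hr1 hr2p
    by_cases hroots : f1.1 = f2.1
    · rw [if_neg (by simpa using hroots), if_neg (by simpa using hsep.mpr hroots)]
      exact ih f2.2 label size clusters hprer ⟨dep, hinv2⟩
    · rw [if_pos hroots, if_pos (fun h => hroots (hsep.mp h))]
      by_cases hcl : clusters ≤ numClusters
      · rw [if_pos hcl, if_pos hcl]
      · rw [if_neg hcl, if_neg hcl]
        obtain ⟨hro, hinv3, hiff3⟩ :=
          pvFindA_spec (f2.2.length + 1) f2.2 j hinv2 hiv (hfuel f2.2 j hinv2 hiv)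
        set fo := pvFindA (f2.2.length + 1) f2.2 j with hfodef
        obtain ⟨hrl, hinv4, hiff4⟩ :=
          pvFindA_spec (fo.2.length + 1) fo.2 i hinv3 hiu (hfuel fo.2 i hinv3 hiu)
        set fl := pvFindA (fo.2.length + 1) fo.2 i with hfldef
        -- identify the two union-time roots with the comparison roots
        have hoeq : fo.1 = f2.1 :=
          pvRootsTo_unique hro ((hiff2 j f2.1).mpr hr2)
        have hleq : fl.1 = f1.1 :=
          pvRootsTo_unique hrl ((hiff3 i f1.1).mpr ((hiff2 i f1.1).mpr ((hiff1 i f1.1).mpr hr1)))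
        -- roots in fl.2
        have hrl4 : pvRootsTo fl.2 i fl.1 := (hiff4 i fl.1).mpr hrl
        have hro4 : pvRootsTo fl.2 j fo.1 :=
          (hiff4 j fo.1).mpr ((hiff3 j fo.1).mpr hro)
        have hfixl : fl.2.getD fl.1 0 = fl.1 := pvRootsTo_fix hrl4
        have hfixo : fl.2.getD fo.1 0 = fo.1 := pvRootsTo_fix hro4
        have hlne : fl.1 ≠ fo.1 := by rw [hleq, hoeq]; exact hroots
        have hln : fl.1 < n := pvRootsTo_lt hinv4.ent hiu hrl4
        have hon : fo.1 < n := pvRootsTo_lt hinv4.ent hiv hro4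
        -- the union-time roots carry the labels of the two endpoints
        have hlabl : label.getD fl.1 0 = label.getD i 0 :=
          (hinv4.sep fl.1 i fl.1 fl.1 hln hiu (.root fl.1 hfixl) hrl4).mpr rfl
        have hlabo : label.getD fo.1 0 = label.getD j 0 :=
          (hinv4.sep fo.1 j fo.1 fo.1 hon hiv (.root fo.1 hfixo) hro4).mpr rfl
        by_cases hsz : size.getD fo.1 0 ≤ size.getD fl.1 0
        · rw [if_pos hsz]
          exact ih (fl.2.set fo.1 fl.1) _ _ (clusters - 1) hprer
            (pvInv_union hinv4 hln hon hfixl hfixo hlne hlabl hlabo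
              (Or.inr ⟨rfl, rfl⟩))
        · rw [if_neg hsz]
          exact ih (fl.2.set fl.1 fo.1) _ _ (clusters - 1) hprer
            (pvInv_union hinv4 hln hon hfixl hfixo hlne hlabl hlabo
              (Or.inl ⟨rfl, rfl⟩))

theorem pvInv_init (numNodes : Int) :
    pvInv numNodes.toNat (List.range numNodes.toNat) (PySem.List.pyRange 0 numNodes 1) := by
  have hlen : (PySem.List.pyRange 0 numNodes 1).length = numNodes.toNat := by
    rw [PySem.List.length_pyRange_one]; omega
  have hlab : ∀ k, k < numNodes.toNat →
      (PySem.List.pyRange 0 numNodes 1).getD k 0 = (k : Int) := by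
    intro k hk
    rw [PySem.List.pyRange_one,
      List.getD_eq_getElem _ _ (by simpa using (by omega : k < (numNodes - 0).toNat))]
    simp
  have hpar : ∀ k, k < numNodes.toNat → (List.range numNodes.toNat).getD k 0 = k := by
    intro k hk
    rw [List.getD_eq_getElem _ _ (by simpa using hk)]
    simp
  refine ⟨fun _ => 0, by simp, hlen, ?_, ?_, ?_, ?_, ?_⟩
  · intro k hk; rw [hpar k hk]; exact hk
  · intro k hk; rw [hpar k hk]; simp
  · intro k hk hne; exact absurd (hpar k hk) hne
  · intro k hk
    have hmem : (PySem.List.pyRange 0 numNodes 1).getD k 0 ∈ PySem.List.pyRange 0 numNodes 1 := by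
      rw [List.getD_eq_getElem _ _ (by omega)]
      exact List.getElem_mem _
    exact List.countP_pos_iff.mpr ⟨_, hmem, by simp⟩
  · intro i j ri rj hi hj hri hrj
    rw [pvRootsTo_fix_eq (hpar i hi) hri, pvRootsTo_fix_eq (hpar j hj) hrj,
      hlab i hi, hlab j hj]
    exact Nat.cast_inj

-- ===== VERDICT (by name: the statement is the Claim_ definition above) =====
theorem kruskalClustering_spec : Claim_equal_kruskalClustering := by
  intro edges numNodes numClusters hdom hpre
  unfold Spec_kruskalClustering
  simp only [kruskalClustering, kruskalClustering_alt]
  refine pvLoop_eq numNodes numClusters numNodes.toNat rfl _ _ _ _ _ ?_ (pvInv_init numNodes)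
  intro x hx
  exact hpre x ((PySem.List.mem_sorted _ _ _ _).mp hx)
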